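-- pv_equiv track=rewrite | github.com/mmills6060/Northeastern-Masters-in-Computer-Science | CS 5800/Problem_Sets/Problem_Set_2/MichaelMills-GoogleQuestion.py | solution
-- ===== SOURCE A (Python) =====
-- def solution(letters):
--     # Take the string and convert it into a list of letters, separated by the comma
--     letters = letters.split(", ")
--
--     # Count the occurrences of each letter in the list
--     letter_counts = {}
--     for letter in letters:
--         if letter in letter_counts:
--             letter_counts[letter] += 1
--         else:
--             letter_counts[letter] = 1
--
--     # Find the minimum count among all letters
--     min_count = min(letter_counts.values())
--
--     # Create a sorted list of letters
--     unique_letters = sorted(set(letters))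
--
--     # Create a string with the letters separated by commas
--     unique_letters_str = ", ".join(unique_letters)
--
--     # The maximum number of equal parts is the minimum count
--     return min_count, unique_letters_str
-- ===== SOURCE B (Python) =====
-- def solution(letters):
--     ordered = sorted(letters.split(", "))
--     prev = ordered[0]
--     keys = [prev]
--     counts = []
--     run = 1
--     for cur in ordered[1:]:
--         if cur == prev:
--             run += 1
--         else:
--             counts.append(run)
--             keys.append(cur)
--             prev = cur
--             run = 1
--     counts.append(run)
--     return min(counts), ", ".join(keys)
-- ===== Notes on version B (the rewrite author's own statement) =====
-- stated objective: alternative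
-- what changed: B sorts the split list once and does a single run-length scan over adjacent equal elements (a manual groupby), taking the minimum of the run lengths and joining the run keys, instead of A's counting dict followed by a separate sorted(set(...)).
import Mathlib
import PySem

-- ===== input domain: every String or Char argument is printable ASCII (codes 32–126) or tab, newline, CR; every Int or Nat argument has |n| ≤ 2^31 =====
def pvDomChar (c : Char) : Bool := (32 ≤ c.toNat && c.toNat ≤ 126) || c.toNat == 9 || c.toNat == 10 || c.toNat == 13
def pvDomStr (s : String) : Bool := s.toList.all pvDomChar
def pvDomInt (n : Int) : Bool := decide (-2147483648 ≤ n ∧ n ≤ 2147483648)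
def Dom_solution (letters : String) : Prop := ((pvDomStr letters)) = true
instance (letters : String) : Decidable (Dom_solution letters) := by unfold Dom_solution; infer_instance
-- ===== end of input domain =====

-- B sorts the split list once and scans adjacent runs (a manual groupby) instead of A's
-- counting dict plus a separate sorted(set(...)); objective: alternative (same cost).

-- ===== PORT A =====
def solution (letters : String) : Int × String :=
  let lst := (PySem.Str.split? letters ", ").getD []   -- sep is the non-empty literal ", ", so split? is never none
  let letterCounts := lst.foldl (fun d letter =>
      if d.contains letter then d.insert letter (d.getD letter 0 + 1)
      else d.insert letter 1) PySem.Dict.empty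
  let minCount : Int := match PySem.List.min? letterCounts.values (fun x => x) with
    | some m => m
    | none => 0   -- unreachable: split always yields a non-empty list
  let uniqueLetters := PySem.List.sorted (PySem.Set.ofList lst) (fun x => x)
  (minCount, PySem.Str.join ", " uniqueLetters)

-- ===== PORT B =====
-- the for-loop of Source B over ordered[1:], carrying (prev, keys, counts, run)
def solutionAltLoop : List String → String → List String → List Int → Int → List String × List Int
  | [], _, keys, counts, run => (keys, counts ++ [run])
  | cur :: rest, prev, keys, counts, run =>
    if cur == prev then solutionAltLoop rest prev keys counts (run + 1)
    else solutionAltLoop rest cur (keys ++ [cur]) (counts ++ [run]) 1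

def solution_alt (letters : String) : Int × String :=
  let ordered := PySem.List.sorted ((PySem.Str.split? letters ", ").getD []) (fun x => x)
  match ordered with
  | [] => (0, "")   -- unreachable: split always yields a non-empty list, so ordered[0] exists
  | p :: tail =>
    let kc := solutionAltLoop tail p [p] [] 1
    (match PySem.List.min? kc.2 (fun x => x) with
      | some m => m
      | none => 0,   -- unreachable: counts is non-empty
     PySem.Str.join ", " kc.1)

-- ===== PRECONDITION & SPEC =====
def Spec_solution (letters : String) (out : Int × String) : Prop := out = solution_alt letters
instance (letters : String) (out : Int × String) : Decidable (Spec_solution letters out) := by unfold Spec_solution; infer_instance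

-- ===== CLAIM (what is proved, stated in full; the proofs are below) =====
def Claim_equal_solution : Prop := ∀ (letters : String), Dom_solution letters → Spec_solution letters (solution letters)

-- ===== LEMMAS AND PROOFS =====

-- Python dedup (first occurrences) is a sublist of the original list
theorem pv_dedup_sublist (ys : List String) : (PySem.List.dedup ys).Sublist ys := by
  induction ys with
  | nil => simp [PySem.List.dedup]
  | cons x xs ih =>
    rw [PySem.List.dedup_eq_ofList, PySem.Set.ofList_cons]
    refine List.Sublist.cons₂ x ?_
    exact (List.filter_sublist).trans (by rw [← PySem.List.dedup_eq_ofList]; exact ih)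

-- min() of a list of Ints depends only on its multiset of elements
theorem pv_min?_perm {xs ys : List Int} (h : xs.Perm ys) :
    PySem.List.min? xs (fun x => x) = PySem.List.min? ys (fun x => x) := by
  rcases hx : PySem.List.min? xs (fun x => x) with _ | a
  · rw [(PySem.List.min?_eq_none_iff xs _).1 hx] at h
    rw [(PySem.List.min?_eq_none_iff ys _).2 h.nil_eq.symm]
  · rcases hy : PySem.List.min? ys (fun x => x) with _ | b
    · exfalso
      rw [(PySem.List.min?_eq_none_iff ys _).1 hy] at h
      rw [(PySem.List.min?_eq_none_iff xs _).2 h.eq_nil] at hx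
      exact absurd hx (by simp)
    · have ha := PySem.List.min?_mem hx
      have hb := PySem.List.min?_mem hy
      have h1 := PySem.List.min?_isMin hx b (h.mem_iff.mpr hb)
      have h2 := PySem.List.min?_isMin hy a (h.mem_iff.mp ha)
      exact congrArg some (le_antisymm h1 h2)

-- characterisation of Source B's run-length loop on a sorted tail:
-- it appends the remaining distinct keys and their multiplicities
theorem pv_loop_char (ys : List String) : ∀ (prev : String) (keys : List String) (counts : List Int) (run : Int),
    List.Pairwise (· ≤ ·) (prev :: ys) →
    solutionAltLoop ys prev keys counts run =
      (keys ++ (PySem.List.dedup ys).filter (fun k => !(k == prev)),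
       counts ++ (run + (List.count prev ys : Int)) ::
         ((PySem.List.dedup ys).filter (fun k => !(k == prev))).map (fun k => (List.count k ys : Int))) := by
  induction ys with
  | nil => intro prev keys counts run _; simp [solutionAltLoop, PySem.List.dedup]
  | cons cur rest ih =>
    intro prev keys counts run hp
    have hp1 : prev ≤ cur := (List.pairwise_cons.1 hp).1 cur (by simp)
    have hpc : List.Pairwise (· ≤ ·) (cur :: rest) := (List.pairwise_cons.1 hp).2
    have hcr : ∀ x ∈ rest, cur ≤ x := (List.pairwise_cons.1 hpc).1
    have hdc : PySem.List.dedup (cur :: rest) = cur :: (PySem.List.dedup rest).filter (fun y => !(y == cur)) := by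
      rw [PySem.List.dedup_eq_ofList, PySem.Set.ofList_cons, PySem.List.dedup_eq_ofList]; rfl
    by_cases hc : cur = prev
    · subst hc
      rw [show solutionAltLoop (cur :: rest) cur keys counts run = solutionAltLoop rest cur keys counts (run + 1) by
        simp [solutionAltLoop]]
      rw [ih cur keys counts (run + 1) hpc]
      have hflt : (PySem.List.dedup (cur :: rest)).filter (fun k => !(k == cur))
          = (PySem.List.dedup rest).filter (fun k => !(k == cur)) := by
        rw [hdc]; simp [List.filter_filter]
      have hmap : ((PySem.List.dedup rest).filter (fun k => !(k == cur))).map (fun k => (List.count k (cur :: rest) : Int))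
          = ((PySem.List.dedup rest).filter (fun k => !(k == cur))).map (fun k => (List.count k rest : Int)) := by
        refine List.map_congr_left ?_
        intro k hk
        have : ¬ (k == cur) = true := by
          have := (List.mem_filter.1 hk).2; simpa using this
        rw [List.count_cons_of_ne (fun h => this (by simp [h]))]
      refine Prod.ext ?_ ?_
      · rw [hflt]
      · rw [hflt, hmap, List.count_cons_self]
        push_cast
        ring_nf
    · have hprevlt : prev < cur := lt_of_le_of_ne hp1 (fun h => hc h.symm)
      have hrestne : ∀ x ∈ rest, x ≠ prev := fun x hx h =>
        absurd (lt_of_lt_of_le hprevlt (hcr x hx)) (by rw [h]; exact lt_irrefl prev)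
      rw [show solutionAltLoop (cur :: rest) prev keys counts run
            = solutionAltLoop rest cur (keys ++ [cur]) (counts ++ [run]) 1 by
        simp [solutionAltLoop, hc]]
      rw [ih cur (keys ++ [cur]) (counts ++ [run]) 1 hpc]
      have hflt : (PySem.List.dedup (cur :: rest)).filter (fun k => !(k == prev))
          = cur :: (PySem.List.dedup rest).filter (fun k => !(k == cur)) := by
        rw [hdc, List.filter_cons]
        have h1 : (!(cur == prev)) = true := by simp [hc]
        rw [if_pos h1]
        congr 1
        rw [List.filter_filter]
        refine List.filter_congr ?_
        intro k hk
        have hkr : k ∈ rest := (PySem.List.mem_dedup rest k).1 hk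
        simp [hrestne k hkr]
      have hcnt0 : List.count prev (cur :: rest) = 0 := by
        rw [List.count_eq_zero]
        intro hmem
        rcases List.mem_cons.1 hmem with h | h
        · exact hc h.symm
        · exact hrestne prev h rfl
      have hmap : ((PySem.List.dedup rest).filter (fun k => !(k == cur))).map (fun k => (List.count k (cur :: rest) : Int))
          = ((PySem.List.dedup rest).filter (fun k => !(k == cur))).map (fun k => (List.count k rest : Int)) := by
        refine List.map_congr_left ?_
        intro k hk
        have : ¬ (k == cur) = true := by
          have := (List.mem_filter.1 hk).2; simpa using this
        rw [List.count_cons_of_ne (fun h => this (by simp [h]))]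
      refine Prod.ext ?_ ?_
      · rw [hflt]
        simp
      · rw [hflt, List.map_cons, hmap, hcnt0, List.count_cons_self]
        push_cast
        ring_nf
        simp

-- A's counting loop (with the if) is collections.Counter
theorem pv_dictloop_eq_counter (lst : List String) :
    lst.foldl (fun d letter =>
      if d.contains letter then d.insert letter (d.getD letter 0 + 1)
      else d.insert letter 1) PySem.Dict.empty = PySem.Dict.counter lst := by
  rw [← PySem.Dict.foldl_insert_getD_add_one_eq_counter]
  have hf : (fun (d : PySem.Dict String Int) letter =>
      if d.contains letter then d.insert letter (d.getD letter 0 + 1)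
      else d.insert letter 1)
      = (fun (d : PySem.Dict String Int) x => d.insert x (d.getD x 0 + 1)) := by
    funext d x
    by_cases h : d.contains x = true
    · rw [if_pos h]
    · rw [if_neg h]
      have h0 : d.get? x = none := (PySem.Dict.get?_eq_none_iff_contains d x).2 (by simpa using h)
      simp [PySem.Dict.getD, h0]
  rw [hf]

-- the sorted deduped keys produced by B's scan equal A's sorted(set(lst))
theorem pv_keys_eq (lst : List String) :
    PySem.List.sorted (PySem.Set.ofList lst) (fun x => x)
      = PySem.List.dedup (PySem.List.sorted lst (fun x => x)) := by
  refine PySem.List.sorted_eq_of_perm_of_pairwise_lt _ _ _ ?_ ?_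
  · refine (List.perm_ext_iff_of_nodup (PySem.List.nodup_dedup _) (PySem.Set.nodup_ofList _)).2 ?_
    intro a
    rw [PySem.List.mem_dedup, PySem.List.mem_sorted, PySem.Set.mem_ofList]
  · have hle : List.Pairwise (· ≤ ·) (PySem.List.dedup (PySem.List.sorted lst (fun x => x))) :=
      List.Pairwise.sublist (pv_dedup_sublist _) (PySem.List.sorted_pairwise lst (fun x => x))
    have hne : List.Pairwise (· ≠ ·) (PySem.List.dedup (PySem.List.sorted lst (fun x => x))) :=
      PySem.List.nodup_dedup _
    exact (hle.and hne).imp (fun h => lt_of_le_of_ne h.1 h.2)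

-- ===== VERDICT (by name: the statement is the Claim_ definition above) =====
theorem solution_spec : Claim_equal_solution := by
  intro letters _
  unfold Spec_solution solution solution_alt
  set lst := (PySem.Str.split? letters ", ").getD [] with hlst
  rcases hs : PySem.List.sorted lst (fun x => x) with _ | ⟨p, tail⟩
  · have h0 : lst = [] := (PySem.List.sorted_eq_nil_iff lst _ false).1 hs
    rw [h0]
    rfl
  · have hpw : List.Pairwise (· ≤ ·) (p :: tail) := by
      rw [← hs]; exact PySem.List.sorted_pairwise lst (fun x => x)
    dsimp only
    rw [pv_loop_char tail p [p] [] 1 hpw]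
    rw [pv_dictloop_eq_counter]
    -- keys
    have hded : PySem.List.dedup (p :: tail) = p :: (PySem.List.dedup tail).filter (fun k => !(k == p)) := by
      rw [PySem.List.dedup_eq_ofList, PySem.Set.ofList_cons, PySem.List.dedup_eq_ofList]; rfl
    have hkeys : [p] ++ (PySem.List.dedup tail).filter (fun k => !(k == p))
        = PySem.List.sorted (PySem.Set.ofList lst) (fun x => x) := by
      rw [pv_keys_eq, hs, hded]
      simp
    -- counts
    have hcounts : ([] : List Int) ++ (1 + (List.count p tail : Int)) ::
          ((PySem.List.dedup tail).filter (fun k => !(k == p))).map (fun k => (List.count k tail : Int))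
        = (PySem.List.dedup (p :: tail)).map (fun k => (List.count k (p :: tail) : Int)) := by
      rw [hded, List.map_cons, List.count_cons_self]
      simp only [List.nil_append]
      congr 1
      · push_cast; ring
      · refine (List.map_congr_left ?_).symm
        intro k hk
        have : ¬ (k == p) = true := by
          have := (List.mem_filter.1 hk).2; simpa using this
        rw [List.count_cons_of_ne (fun h => this (by simp [h]))]
    -- values of the counter
    have hvals : (PySem.Dict.counter lst).values
        = (PySem.Set.ofList lst).map (fun k => (List.count k lst : Int)) := by
      rw [PySem.Dict.values_eq_map_keys _ (PySem.Dict.nodup_keys_counter lst) 0]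
      rw [PySem.Dict.keys_counter]
      refine List.map_congr_left ?_
      intro k _
      rw [PySem.Dict.getD_counter]
    -- the two min? arguments are permutations of each other
    have hperm : ((PySem.Dict.counter lst).values).Perm
        ((PySem.List.dedup (p :: tail)).map (fun k => (List.count k (p :: tail) : Int))) := by
      rw [hvals]
      have hp1 : (PySem.List.dedup (p :: tail)).Perm (PySem.Set.ofList lst) := by
        rw [← hs, ← pv_keys_eq]
        exact PySem.List.sorted_perm (PySem.Set.ofList lst) (fun x => x) false
      have hcnt : ∀ k, List.count k (p :: tail) = List.count k lst := by
        intro k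
        rw [← hs]
        exact (PySem.List.sorted_perm lst (fun x => x) false).count_eq k
      calc ((PySem.Set.ofList lst).map (fun k => (List.count k lst : Int))).Perm
            ((PySem.List.dedup (p :: tail)).map (fun k => (List.count k lst : Int))) :=
              (hp1.map (fun k => (List.count k lst : Int))).symm
        _ = (PySem.List.dedup (p :: tail)).map (fun k => (List.count k (p :: tail) : Int)) := by
              refine List.map_congr_left ?_
              intro k _
              rw [hcnt k]
    rw [hcounts]
    rw [pv_min?_perm hperm, hkeys]
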